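-- pv_equiv track=rewrite | github.com/jacksonfellows/euler | python/090_Cube_digit_pairs.py | can_display_squares
-- ===== SOURCE A (Python) =====
-- square_digits = [(x*x//10,x*x%10) for x in range(1,10)]
--
-- def extend_die(die):
--     ext = set()
--     for x in die:
--         ext.add(x)
--         if x == 6:
--             ext.add(9)
--         elif x == 9:
--             ext.add(6)
--     return ext
--
-- def can_display_squares(a, b):
--     a_ = extend_die(a)
--     b_ = extend_die(b)
--     for x,y in square_digits:
--         if (x in a_ and y in b_) or (y in a_ and x in b_):
--             pass
--         else:
--             return False
--     return True
-- ===== SOURCE B (Python) =====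
-- square_digits = [(x*x//10, x*x%10) for x in range(1,10)]
--
-- def _extend(die):
--     s = set(die)
--     if 6 in s:
--         s.add(9)
--     if 9 in s:
--         s.add(6)
--     return s
--
-- def _shown(die):
--     e = _extend(die)
--     return [d for d in range(10) if d in e]
--
-- def can_display_squares(a, b):
--     a_ = _shown(a)
--     b_ = _shown(b)
--     reachable = [frozenset((x, y)) for x in a_ for y in b_]
--     return all(frozenset(p) in reachable for p in square_digits)
-- ===== Notes on version B (the rewrite author's own statement) =====
-- stated objective: simpler
-- what changed: Replaces the per-square both-orders membership loop with precomputing the set of unordered digit pairs the two dice can jointly display and a single set-subset test against the set of square digit pairs.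
import Mathlib
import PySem

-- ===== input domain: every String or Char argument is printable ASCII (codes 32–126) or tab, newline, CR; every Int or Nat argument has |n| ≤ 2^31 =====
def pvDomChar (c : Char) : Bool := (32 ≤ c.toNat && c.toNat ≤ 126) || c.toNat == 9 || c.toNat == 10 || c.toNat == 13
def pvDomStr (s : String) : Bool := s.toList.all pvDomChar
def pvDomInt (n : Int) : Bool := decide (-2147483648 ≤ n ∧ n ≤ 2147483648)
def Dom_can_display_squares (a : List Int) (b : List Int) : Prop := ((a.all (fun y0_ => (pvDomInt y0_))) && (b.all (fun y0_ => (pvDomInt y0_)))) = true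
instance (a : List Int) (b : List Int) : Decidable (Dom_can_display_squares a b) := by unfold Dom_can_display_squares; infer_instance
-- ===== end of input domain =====

-- B replaces A's per-square both-orders membership loop by a precomputed set of
-- displayable unordered digit pairs and one set-subset test (objective: simpler).

-- ===== PORT A =====
def squareDigits : List (Int × Int) :=
  (PySem.List.pyRange 1 10 1).map
    (fun x => (PySem.Int.floordiv (x * x) 10, PySem.Int.mod (x * x) 10))

def extendDie (die : List Int) : PySem.Set Int :=
  die.foldl
    (fun ext x =>
      let ext := PySem.Set.add ext x
      if x == 6 then PySem.Set.add ext 9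
      else if x == 9 then PySem.Set.add ext 6
      else ext)
    PySem.Set.empty

def canLoop (a_ b_ : PySem.Set Int) : List (Int × Int) → Bool
  | [] => true
  | (x, y) :: rest =>
    if (PySem.Set.contains a_ x && PySem.Set.contains b_ y)
        || (PySem.Set.contains a_ y && PySem.Set.contains b_ x) then
      canLoop a_ b_ rest
    else
      false

def can_display_squares (a : List Int) (b : List Int) : Bool :=
  canLoop (extendDie a) (extendDie b) squareDigits

-- ===== PORT B =====
def extendDieB (die : List Int) : PySem.Set Int :=
  let s := PySem.Set.ofList die
  let s := if PySem.Set.contains s 6 then PySem.Set.add s 9 else s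
  if PySem.Set.contains s 9 then PySem.Set.add s 6 else s

def digitsShown (die : List Int) : List Int :=
  let e := extendDieB die
  (PySem.List.pyRange 0 10 1).filter (fun d => PySem.Set.contains e d)

-- frozenset((x, y)) ported as the sorted pair: an exact encoding of two-element
-- (or one-element, when x = y) frozensets of ints.
def pairKey (x y : Int) : Int × Int := if x ≤ y then (x, y) else (y, x)

def can_display_squares_alt (a : List Int) (b : List Int) : Bool :=
  let a_ := digitsShown a
  let b_ := digitsShown b
  let reachable := a_.flatMap (fun x => b_.map (fun y => pairKey x y))
  squareDigits.all (fun p => reachable.contains (pairKey p.1 p.2))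

-- ===== PRECONDITION & SPEC =====
def Spec_can_display_squares (a : List Int) (b : List Int) (out : Bool) : Prop := out = can_display_squares_alt a b
instance (a : List Int) (b : List Int) (out : Bool) : Decidable (Spec_can_display_squares a b out) := by unfold Spec_can_display_squares; infer_instance

-- ===== CLAIM (what is proved, stated in full; the proofs are below) =====
def Claim_equal_can_display_squares : Prop := ∀ (a : List Int) (b : List Int), Dom_can_display_squares a b → Spec_can_display_squares a b (can_display_squares a b)

-- ===== LEMMAS AND PROOFS =====

-- membership in the extended die (shared characterisation of both extensions)
def extMem (die : List Int) (x : Int) : Prop :=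
  x ∈ die ∨ (x = 9 ∧ 6 ∈ die) ∨ (x = 6 ∧ 9 ∈ die)

theorem foldl_ext_mem (die : List Int) : ∀ (s : PySem.Set Int) (y : Int),
    y ∈ die.foldl
        (fun ext x =>
          let ext := PySem.Set.add ext x
          if x == 6 then PySem.Set.add ext 9
          else if x == 9 then PySem.Set.add ext 6
          else ext) s
      ↔ y ∈ s ∨ extMem die y := by
  induction die with
  | nil => intro s y; simp [extMem]
  | cons x xs ih =>
    intro s y
    simp only [List.foldl_cons, ih]
    by_cases h6 : x = 6 <;> by_cases h9 : x = 9 <;>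
      simp [h6, h9, PySem.Set.mem_add, extMem, List.mem_cons] <;> tauto

theorem mem_extendDie (die : List Int) (y : Int) :
    y ∈ extendDie die ↔ extMem die y := by
  have h := foldl_ext_mem die PySem.Set.empty y
  simpa [extendDie, PySem.Set.empty] using h

theorem mem_extendDieB (die : List Int) (y : Int) :
    y ∈ extendDieB die ↔ extMem die y := by
  unfold extendDieB extMem
  dsimp only
  split_ifs with h6 h9 h9' <;>
    simp only [PySem.Set.contains_iff, PySem.Set.mem_add, PySem.Set.mem_ofList] at * <;>
    (by_cases hy6 : y = 6 <;> by_cases hy9 : y = 9 <;> simp [hy6, hy9] at * <;> tauto)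

theorem pairKey_eq_iff (u v x y : Int) :
    pairKey u v = pairKey x y ↔ (u = x ∧ v = y) ∨ (u = y ∧ v = x) := by
  unfold pairKey
  split_ifs <;> simp [Prod.mk.injEq] <;> omega

theorem canLoop_eq_all (s t : PySem.Set Int) (l : List (Int × Int)) :
    canLoop s t l
      = l.all (fun p =>
          (PySem.Set.contains s p.1 && PySem.Set.contains t p.2)
            || (PySem.Set.contains s p.2 && PySem.Set.contains t p.1)) := by
  induction l with
  | nil => rfl
  | cons p rest ih =>
    obtain ⟨x, y⟩ := p
    simp only [canLoop, List.all_cons, ih]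
    cases h : (PySem.Set.contains s x && PySem.Set.contains t y)
        || (PySem.Set.contains s y && PySem.Set.contains t x) <;> simp

theorem A_iff (a b : List Int) :
    can_display_squares a b = true ↔
      ∀ p ∈ squareDigits, (extMem a p.1 ∧ extMem b p.2) ∨ (extMem a p.2 ∧ extMem b p.1) := by
  unfold can_display_squares
  rw [canLoop_eq_all, List.all_eq_true]
  simp only [Bool.or_eq_true, Bool.and_eq_true, PySem.Set.contains_iff, mem_extendDie]

theorem squareDigits_bounds :
    ∀ p ∈ squareDigits, 0 ≤ p.1 ∧ p.1 < 10 ∧ 0 ≤ p.2 ∧ p.2 < 10 := by decide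

theorem mem_digitsShown (die : List Int) (d : Int) :
    d ∈ digitsShown die ↔ (0 ≤ d ∧ d < 10) ∧ extMem die d := by
  unfold digitsShown
  simp only [List.mem_filter, PySem.List.mem_pyRange_one, PySem.Set.contains_iff,
    mem_extendDieB]

theorem B_iff (a b : List Int) :
    can_display_squares_alt a b = true ↔
      ∀ p ∈ squareDigits, (extMem a p.1 ∧ extMem b p.2) ∨ (extMem a p.2 ∧ extMem b p.1) := by
  unfold can_display_squares_alt
  rw [List.all_eq_true]
  constructor
  · intro h p hp
    have := h p hp
    rw [List.contains_iff_mem, List.mem_flatMap] at this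
    obtain ⟨x, hx, hmem⟩ := this
    rw [List.mem_map] at hmem
    obtain ⟨y, hy, hkey⟩ := hmem
    rw [pairKey_eq_iff] at hkey
    rw [mem_digitsShown] at hx hy
    rcases hkey with ⟨hx1, hy1⟩ | ⟨hx1, hy1⟩
    · exact Or.inl ⟨hx1 ▸ hx.2, hy1 ▸ hy.2⟩
    · exact Or.inr ⟨hx1 ▸ hx.2, hy1 ▸ hy.2⟩
  · intro h p hp
    obtain ⟨b1, b2, b3, b4⟩ := squareDigits_bounds p hp
    rw [List.contains_iff_mem, List.mem_flatMap]
    rcases h p hp with ⟨h1, h2⟩ | ⟨h1, h2⟩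
    · exact ⟨p.1, (mem_digitsShown a p.1).mpr ⟨⟨b1, b2⟩, h1⟩,
        List.mem_map.mpr ⟨p.2, (mem_digitsShown b p.2).mpr ⟨⟨b3, b4⟩, h2⟩, rfl⟩⟩
    · exact ⟨p.2, (mem_digitsShown a p.2).mpr ⟨⟨b3, b4⟩, h1⟩,
        List.mem_map.mpr ⟨p.1, (mem_digitsShown b p.1).mpr ⟨⟨b1, b2⟩, h2⟩,
          (pairKey_eq_iff p.2 p.1 p.1 p.2).mpr (Or.inr ⟨rfl, rfl⟩)⟩⟩

-- ===== VERDICT (by name: the statement is the Claim_ definition above) =====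
theorem can_display_squares_spec : Claim_equal_can_display_squares := by
  intro a b _
  unfold Spec_can_display_squares
  rw [Bool.eq_iff_iff, A_iff, B_iff]
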